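-- pv_equiv track=rewrite | github.com/Draco-21/CS412_chatbot | chatbot_trial.py | detect_language_and_framework
-- ===== SOURCE A (Python) =====
-- def detect_language_and_framework(query: str) -> tuple:
--     """Detect programming language and framework preferences from query."""
--     query_lower = query.lower()
--
--     # Language detection
--     languages = {
--         "python": ["python", "flask", "django", "fastapi"],
--         "javascript": ["javascript", "js", "node", "express", "koa"],
--         "php": ["php", "laravel"]
--     }
--
--     detected_language = None
--     for lang, keywords in languages.items():
--         if any(keyword in query_lower for keyword in keywords):
--             detected_language = lang
--             break
--
--     # Framework detection
--     frameworks = {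
--         "python": ["flask", "django", "fastapi"],
--         "javascript": ["express", "koa"],
--         "php": ["laravel"]
--     }
--
--     detected_framework = None
--     if detected_language:
--         for framework in frameworks[detected_language]:
--             if framework in query_lower:
--                 detected_framework = framework
--                 break
--
--         # Default frameworks if none specified
--         if not detected_framework:
--             defaults = {
--                 "python": "flask",
--                 "javascript": "express",
--                 "php": "laravel"
--             }
--             detected_framework = defaults[detected_language]
--
--     # Default to Python/Flask if no language detected
--     if not detected_language:
--         detected_language = "python"
--         detected_framework = "flask"
--
--     return detected_language, detected_framework
-- ===== SOURCE B (Python) =====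
-- def detect_language_and_framework(query: str) -> tuple:
--     """Detect programming language and framework preferences from query."""
--     ql = query.lower()
--     defaults = {"python": "flask", "javascript": "express", "php": "laravel"}
--     # one ordered table, flattening A's language-priority and framework-priority
--     table = [
--         ("flask", "python", "flask"),
--         ("django", "python", "django"),
--         ("fastapi", "python", "fastapi"),
--         ("python", "python", None),
--         ("express", "javascript", "express"),
--         ("koa", "javascript", "koa"),
--         ("javascript", "javascript", None),
--         ("js", "javascript", None),
--         ("node", "javascript", None),
--         ("laravel", "php", "laravel"),
--         ("php", "php", None),
--     ]
--     for kw, lang, fw in table: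
--         if kw in ql:
--             return lang, fw if fw is not None else defaults[lang]
--     return "python", "flask"
-- ===== Notes on version B (the rewrite author's own statement) =====
-- stated objective: simpler
-- what changed: Replaces A's two-stage scan (language dict with any(), then a per-language framework scan plus a defaults dict lookup) by a single ordered (keyword, language, framework) lookup table scanned once, first match wins.
import Mathlib
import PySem

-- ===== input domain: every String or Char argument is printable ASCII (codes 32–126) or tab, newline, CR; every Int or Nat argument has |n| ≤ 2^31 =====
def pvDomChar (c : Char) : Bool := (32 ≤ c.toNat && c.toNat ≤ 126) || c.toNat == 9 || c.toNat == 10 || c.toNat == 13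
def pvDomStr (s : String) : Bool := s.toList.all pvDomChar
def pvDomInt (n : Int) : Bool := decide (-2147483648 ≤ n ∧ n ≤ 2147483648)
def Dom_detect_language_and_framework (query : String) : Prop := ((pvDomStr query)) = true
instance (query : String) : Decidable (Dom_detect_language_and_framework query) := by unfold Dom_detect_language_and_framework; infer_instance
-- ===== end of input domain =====

-- B flattens A's two nested keyword scans (language dict, then per-language framework dict)
-- into ONE ordered (keyword, language, framework) table scanned once; objective: simpler.


-- ===== PORT A =====
-- 'for lang, keywords in languages.items(): if any(...): detected_language = lang; break'
def pvLangLoop (ql : String) : List (String × List String) → Option String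
  | [] => none
  | (lang, keywords) :: rest =>
      if keywords.any (fun kw => PySem.Str.isIn kw ql) then some lang
      else pvLangLoop ql rest

-- 'for framework in frameworks[detected_language]: if framework in query_lower: ...; break'
def pvFwLoop (ql : String) : List String → Option String
  | [] => none
  | fw :: rest => if PySem.Str.isIn fw ql then some fw else pvFwLoop ql rest

def detect_language_and_framework (query : String) : String × String :=
  let query_lower := PySem.Str.lower query
  let languages : PySem.Dict String (List String) := PySem.Dict.ofList
    [("python", ["python", "flask", "django", "fastapi"]),
     ("javascript", ["javascript", "js", "node", "express", "koa"]),
     ("php", ["php", "laravel"])]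
  let detected_language := pvLangLoop query_lower (PySem.Dict.items languages)
  let frameworks : PySem.Dict String (List String) := PySem.Dict.ofList
    [("python", ["flask", "django", "fastapi"]),
     ("javascript", ["express", "koa"]),
     ("php", ["laravel"])]
  match detected_language with
  | some lang =>
      let detected_framework := pvFwLoop query_lower (PySem.Dict.getD frameworks lang [])
      match detected_framework with
      | some fw => (lang, fw)
      | none =>
          let defaults : PySem.Dict String String := PySem.Dict.ofList
            [("python", "flask"), ("javascript", "express"), ("php", "laravel")]
          (lang, PySem.Dict.getD defaults lang "")
  | none => ("python", "flask")

-- ===== PORT B =====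
-- 'for kw, lang, fw in table: if kw in ql: return lang, fw if fw is not None else defaults[lang]'
def pvTableLoop (ql : String) (defaults : PySem.Dict String String) :
    List (String × String × Option String) → String × String
  | [] => ("python", "flask")
  | (kw, lang, fw) :: rest =>
      if PySem.Str.isIn kw ql then
        (lang, match fw with | some f => f | none => PySem.Dict.getD defaults lang "")
      else pvTableLoop ql defaults rest

def detect_language_and_framework_alt (query : String) : String × String :=
  let ql := PySem.Str.lower query
  let defaults : PySem.Dict String String := PySem.Dict.ofList
    [("python", "flask"), ("javascript", "express"), ("php", "laravel")]
  let table : List (String × String × Option String) :=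
    [("flask", "python", some "flask"),
     ("django", "python", some "django"),
     ("fastapi", "python", some "fastapi"),
     ("python", "python", none),
     ("express", "javascript", some "express"),
     ("koa", "javascript", some "koa"),
     ("javascript", "javascript", none),
     ("js", "javascript", none),
     ("node", "javascript", none),
     ("laravel", "php", some "laravel"),
     ("php", "php", none)]
  pvTableLoop ql defaults table

-- ===== PRECONDITION & SPEC =====
def Spec_detect_language_and_framework (query : String) (out : String × String) : Prop := out = detect_language_and_framework_alt query
instance (query : String) (out : String × String) : Decidable (Spec_detect_language_and_framework query out) := by unfold Spec_detect_language_and_framework; infer_instance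

-- ===== CLAIM (what is proved, stated in full; the proofs are below) =====
def Claim_equal_detect_language_and_framework : Prop := ∀ (query : String), Dom_detect_language_and_framework query → Spec_detect_language_and_framework query (detect_language_and_framework query)

-- ===== LEMMAS AND PROOFS =====
-- Both programs are functions of the 11 substring tests on the lowered query; abstract
-- them as Booleans and check all cases by 'decide'.
set_option maxHeartbeats 1000000 in
theorem detect_eq (query : String) :
    detect_language_and_framework query = detect_language_and_framework_alt query := by
  unfold detect_language_and_framework detect_language_and_framework_alt
  by_cases h1 : PySem.Chars.isIn ['f', 'l', 'a', 's', 'k'] (PySem.Chars.lower query.toList)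
  · simp [pvLangLoop, pvFwLoop, pvTableLoop, PySem.Dict.ofList,
      PySem.Dict.getD, PySem.Dict.get?, PySem.Dict.insert, PySem.Dict.update, PySem.Dict.empty,
      h1]
  by_cases h2 : PySem.Chars.isIn ['d', 'j', 'a', 'n', 'g', 'o'] (PySem.Chars.lower query.toList)
  · simp [pvLangLoop, pvFwLoop, pvTableLoop, PySem.Dict.ofList,
      PySem.Dict.getD, PySem.Dict.get?, PySem.Dict.insert, PySem.Dict.update, PySem.Dict.empty,
      h1, h2]
  by_cases h3 : PySem.Chars.isIn ['f', 'a', 's', 't', 'a', 'p', 'i'] (PySem.Chars.lower query.toList)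
  · simp [pvLangLoop, pvFwLoop, pvTableLoop, PySem.Dict.ofList,
      PySem.Dict.getD, PySem.Dict.get?, PySem.Dict.insert, PySem.Dict.update, PySem.Dict.empty,
      h1, h2, h3]
  by_cases h4 : PySem.Chars.isIn ['p', 'y', 't', 'h', 'o', 'n'] (PySem.Chars.lower query.toList)
  · simp [pvLangLoop, pvFwLoop, pvTableLoop, PySem.Dict.ofList,
      PySem.Dict.getD, PySem.Dict.get?, PySem.Dict.insert, PySem.Dict.update, PySem.Dict.empty,
      h1, h2, h3, h4]
  by_cases h5 : PySem.Chars.isIn ['e', 'x', 'p', 'r', 'e', 's', 's'] (PySem.Chars.lower query.toList)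
  · simp [pvLangLoop, pvFwLoop, pvTableLoop, PySem.Dict.ofList,
      PySem.Dict.getD, PySem.Dict.get?, PySem.Dict.insert, PySem.Dict.update, PySem.Dict.empty,
      h1, h2, h3, h4, h5]
  by_cases h6 : PySem.Chars.isIn ['k', 'o', 'a'] (PySem.Chars.lower query.toList)
  · simp [pvLangLoop, pvFwLoop, pvTableLoop, PySem.Dict.ofList,
      PySem.Dict.getD, PySem.Dict.get?, PySem.Dict.insert, PySem.Dict.update, PySem.Dict.empty,
      h1, h2, h3, h4, h5, h6]
  by_cases h7 : PySem.Chars.isIn ['j', 'a', 'v', 'a', 's', 'c', 'r', 'i', 'p', 't'] (PySem.Chars.lower query.toList)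
  · simp [pvLangLoop, pvFwLoop, pvTableLoop, PySem.Dict.ofList,
      PySem.Dict.getD, PySem.Dict.get?, PySem.Dict.insert, PySem.Dict.update, PySem.Dict.empty,
      h1, h2, h3, h4, h5, h6, h7]
  by_cases h8 : PySem.Chars.isIn ['j', 's'] (PySem.Chars.lower query.toList)
  · simp [pvLangLoop, pvFwLoop, pvTableLoop, PySem.Dict.ofList,
      PySem.Dict.getD, PySem.Dict.get?, PySem.Dict.insert, PySem.Dict.update, PySem.Dict.empty,
      h1, h2, h3, h4, h5, h6, h7, h8]
  by_cases h9 : PySem.Chars.isIn ['n', 'o', 'd', 'e'] (PySem.Chars.lower query.toList)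
  · simp [pvLangLoop, pvFwLoop, pvTableLoop, PySem.Dict.ofList,
      PySem.Dict.getD, PySem.Dict.get?, PySem.Dict.insert, PySem.Dict.update, PySem.Dict.empty,
      h1, h2, h3, h4, h5, h6, h7, h8, h9]
  by_cases h10 : PySem.Chars.isIn ['l', 'a', 'r', 'a', 'v', 'e', 'l'] (PySem.Chars.lower query.toList)
  · simp [pvLangLoop, pvFwLoop, pvTableLoop, PySem.Dict.ofList,
      PySem.Dict.getD, PySem.Dict.get?, PySem.Dict.insert, PySem.Dict.update, PySem.Dict.empty,
      h1, h2, h3, h4, h5, h6, h7, h8, h9, h10]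
  by_cases h11 : PySem.Chars.isIn ['p', 'h', 'p'] (PySem.Chars.lower query.toList)
  · simp [pvLangLoop, pvFwLoop, pvTableLoop, PySem.Dict.ofList,
      PySem.Dict.getD, PySem.Dict.get?, PySem.Dict.insert, PySem.Dict.update, PySem.Dict.empty,
      h1, h2, h3, h4, h5, h6, h7, h8, h9, h10, h11]
  simp [pvLangLoop, pvFwLoop, pvTableLoop, PySem.Dict.ofList,
      PySem.Dict.getD, PySem.Dict.get?, PySem.Dict.insert, PySem.Dict.update, PySem.Dict.empty,
      h1, h2, h3, h4, h5, h6, h7, h8, h9, h10, h11]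

-- ===== VERDICT (by name: the statement is the Claim_ definition above) =====
theorem detect_language_and_framework_spec : Claim_equal_detect_language_and_framework := by
  intro query _
  unfold Spec_detect_language_and_framework
  exact detect_eq query
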